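-- pv_equiv track=rewrite | github.com/zodia8393/Portfolio | final/config.py | parse_csv_to_dict
-- ===== SOURCE A (Python) =====
-- from typing import Dict, Tuple, List
--
-- def parse_csv_to_dict(raw_data: List[str], tuple_size: int) -> Dict[str, Tuple[str, ...]]:
--     result = {}
--     for i in range(0, len(raw_data), tuple_size):
--         if i + tuple_size <= len(raw_data):
--             key = raw_data[i]
--             values = tuple(raw_data[i+1:i+tuple_size])
--             result[key] = values
--     return result
-- ===== SOURCE B (Python) =====
-- def parse_csv_to_dict(raw_data, tuple_size):
--     # group by consuming one shared iterator: zip with a lazy range draws the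
--     # next tuple_size items; a short draw is the truncated tail and ends the loop
--     if tuple_size <= 0:
--         return {}
--     result = {}
--     it = iter(raw_data)
--     while True:
--         grp = [x for _, x in zip(range(tuple_size), it)]
--         if len(grp) < tuple_size:
--             return result
--         result[grp[0]] = tuple(grp[1:])
-- ===== Notes on version B (the rewrite author's own statement) =====
-- stated objective: alternative
-- what changed: B drops A's stride-index loop (range(0,len,tuple_size), bounds guard, slice arithmetic) and instead consumes one shared iterator: each group is drawn by zipping a lazy range(tuple_size) with the iterator, a short draw marks the truncated tail and ends the loop, and nonpositive sizes short-circuit to {}.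
import Mathlib
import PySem

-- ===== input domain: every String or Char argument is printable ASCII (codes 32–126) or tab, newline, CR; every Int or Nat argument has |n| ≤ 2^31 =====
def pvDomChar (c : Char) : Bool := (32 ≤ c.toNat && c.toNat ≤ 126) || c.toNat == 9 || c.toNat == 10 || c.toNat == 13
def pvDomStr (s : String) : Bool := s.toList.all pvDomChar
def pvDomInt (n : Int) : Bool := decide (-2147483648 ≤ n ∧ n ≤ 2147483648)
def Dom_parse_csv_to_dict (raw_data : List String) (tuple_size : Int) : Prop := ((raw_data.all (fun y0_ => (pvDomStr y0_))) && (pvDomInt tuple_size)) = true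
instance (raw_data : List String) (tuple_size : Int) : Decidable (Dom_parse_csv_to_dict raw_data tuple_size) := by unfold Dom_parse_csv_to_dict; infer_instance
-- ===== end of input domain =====

-- B replaces A's stride-indexed loop (index arithmetic + bounds guard + slices) by consuming the
-- list in groups of tuple_size from the front; a short group is the truncated tail and ends the loop.

-- ===== PORT A =====
-- loop body: 'if i + tuple_size <= len(raw_data): result[raw_data[i]] = tuple(raw_data[i+1:i+tuple_size])'
-- (raw_data[i] uses pyGetD: i ∈ range(0, len, step) is always in range, so the total form is exact here)
def pvStepA (raw_data : List String) (tuple_size : Int) (d : PySem.Dict String (List String)) (i : Int) : PySem.Dict String (List String) :=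
  if i + tuple_size ≤ (raw_data.length : Int) then
    d.insert (PySem.List.pyGetD raw_data i "") (PySem.List.slice raw_data (some (i + 1)) (some (i + tuple_size)))
  else d

def parse_csv_to_dict (raw_data : List String) (tuple_size : Int) : List (String × List String) :=
  ((PySem.List.pyRange 0 (raw_data.length : Int) tuple_size).foldl (pvStepA raw_data tuple_size) PySem.Dict.empty).items

-- ===== PORT B =====
-- the while loop: 'grp = [x for _, x in zip(range(tuple_size), it)]' is the next m+1 items of what
-- is left of the iterator (m+1 = tuple_size, positive by the guard); a short grp returns result,
-- else 'result[grp[0]] = tuple(grp[1:])' and the loop continues on the rest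
def pvAltGo (m : Nat) (xs : List String) (result : PySem.Dict String (List String)) : PySem.Dict String (List String) :=
  if (xs.take (m + 1)).length < m + 1 then result
  else pvAltGo m (xs.drop (m + 1)) (result.insert ((xs.take (m + 1)).headD "") ((xs.take (m + 1)).drop 1))
termination_by xs.length
decreasing_by simp_all [List.length_take, List.length_drop]; omega

def parse_csv_to_dict_alt (raw_data : List String) (tuple_size : Int) : List (String × List String) :=
  if tuple_size ≤ 0 then (PySem.Dict.empty : PySem.Dict String (List String)).items
  else (pvAltGo (tuple_size.toNat - 1) raw_data PySem.Dict.empty).items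

-- ===== PRECONDITION & SPEC =====
-- Pre_ excludes exactly tuple_size = 0, where A raises ValueError (range() with step 0).
def Pre_parse_csv_to_dict (raw_data : List String) (tuple_size : Int) : Prop := tuple_size ≠ 0
instance (raw_data : List String) (tuple_size : Int) : Decidable (Pre_parse_csv_to_dict raw_data tuple_size) := by unfold Pre_parse_csv_to_dict; infer_instance

def pvWitness_parse_csv_to_dict : List String × Int := (["k1", "a", "b", "k2", "c", "d"], 3)

def Spec_parse_csv_to_dict (raw_data : List String) (tuple_size : Int) (out : List (String × List String)) : Prop := out = parse_csv_to_dict_alt raw_data tuple_size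
instance (raw_data : List String) (tuple_size : Int) (out : List (String × List String)) : Decidable (Spec_parse_csv_to_dict raw_data tuple_size out) := by unfold Spec_parse_csv_to_dict; infer_instance

-- ===== CLAIM (what is proved, stated in full; the proofs are below) =====
def Claim_equal_parse_csv_to_dict : Prop := ∀ (raw_data : List String) (tuple_size : Int), Dom_parse_csv_to_dict raw_data tuple_size → Pre_parse_csv_to_dict raw_data tuple_size → Spec_parse_csv_to_dict raw_data tuple_size (parse_csv_to_dict raw_data tuple_size)

-- ===== LEMMAS AND PROOFS =====

-- range recursion for an arbitrary positive step: range(a, b, s) = a :: range(a+s, b, s) when a < b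
lemma pvPyRange_pos_cons (a b s : Int) (hs : 0 < s) (hab : a < b) :
    PySem.List.pyRange a b s = a :: PySem.List.pyRange (a + s) b s := by
  rw [PySem.List.pyRange_of_pos a b hs, PySem.List.pyRange_of_pos (a + s) b hs]
  rw [if_pos hab]
  have key : b - a + s - 1 = (b - a - 1) + s := by ring
  have hdiv : ((b - a - 1) + s) / s = (b - a - 1) / s + 1 := by
    have := Int.add_mul_ediv_right (b - a - 1) 1 (by omega : s ≠ 0); simpa using this
  by_cases h2 : a + s < b
  · rw [if_pos h2, key, hdiv]
    have ht : ((b - a - 1) / s + 1).toNat = ((b - (a + s) + s - 1) / s).toNat + 1 := by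
      have hq : 0 ≤ (b - a - 1) / s := Int.ediv_nonneg (by omega) (by omega)
      have : b - (a + s) + s - 1 = b - a - 1 := by ring
      rw [this]; omega
    rw [ht, List.range_succ_eq_map]
    simp only [List.map_cons, List.map_map, Nat.cast_zero, mul_zero, add_zero]
    congr 1
    apply List.map_congr_left
    intro k _
    simp only [Function.comp_apply]
    push_cast
    ring
  · rw [if_neg h2, key, hdiv]
    have hz : (b - a - 1) / s = 0 := Int.ediv_eq_zero_of_lt (by omega) (by omega)
    rw [hz]
    norm_num [List.range_one]

-- shifting the window: range(a, b, s) = [x + a for x in range(0, b - a, s)]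
lemma pvPyRange_shift (a b s : Int) (hs : 0 < s) :
    PySem.List.pyRange a b s = (PySem.List.pyRange 0 (b - a) s).map (· + a) := by
  rw [PySem.List.pyRange_of_pos a b hs, PySem.List.pyRange_of_pos 0 (b - a) hs, List.map_map]
  by_cases hab : a < b
  · rw [if_pos hab, if_pos (by omega : (0:Int) < b - a),
        show b - a - 0 + s - 1 = b - a + s - 1 by ring]
    apply List.map_congr_left
    intro k _
    simp only [Function.comp_apply]
    ring_nf
  · rw [if_neg hab, if_neg (by omega : ¬ (0:Int) < b - a)]
    simp

-- the loop body of A at index i + t over xs is the loop body of A at index i over xs.drop t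
lemma pvStepA_shift (t : Int) (ht : 0 < t) (xs : List String) (d : PySem.Dict String (List String))
    (i : Int) (hi : 0 ≤ i) (hts : t ≤ (xs.length : Int)) :
    pvStepA xs t d (i + t) = pvStepA (xs.drop t.toNat) t d i := by
  obtain ⟨m, rfl⟩ := Int.eq_ofNat_of_zero_le hi
  obtain ⟨n, rfl⟩ := Int.eq_ofNat_of_zero_le (le_of_lt ht)
  unfold pvStepA
  have hlen : ((xs.drop (n : Int).toNat).length : Int) = (xs.length : Int) - n := by
    simp [List.length_drop]; omega
  rw [hlen]
  by_cases hg : (m : Int) + n ≤ (xs.length : Int) - n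
  · rw [if_pos (show (m : Int) + n + n ≤ (xs.length : Int) by omega), if_pos hg]
    congr 1
    · rw [show (m : Int) + n = ((m + n : Nat) : Int) by push_cast; ring,
          PySem.List.pyGetD_natCast, PySem.List.pyGetD_natCast]
      simp only [Int.toNat_natCast]
      rw [List.getD, List.getD, List.getElem?_drop, Nat.add_comm m n]
    · rw [show (m : Int) + n + 1 = ((m + n + 1 : Nat) : Int) by push_cast; ring,
          show (m : Int) + n + n = ((m + n + n : Nat) : Int) by push_cast; ring,
          PySem.List.slice_natCast,
          show (m : Int) + 1 = ((m + 1 : Nat) : Int) by push_cast; ring,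
          show (m : Int) + n = ((m + n : Nat) : Int) by push_cast; ring,
          PySem.List.slice_natCast]
      simp only [Int.toNat_natCast]
      rw [List.drop_drop]
      rw [show m + n + n - (m + n + 1) = m + n - (m + 1) by omega,
          show m + n + 1 = n + (m + 1) by omega]
  · rw [if_neg (show ¬((m : Int) + n + n ≤ (xs.length : Int)) by omega), if_neg hg]

-- the first full group: A's guarded body at index 0 is B's loop body on the first group
lemma pvStepA_zero (t : Int) (ht : 0 < t) (xs : List String) (d : PySem.Dict String (List String))
    (hts : t ≤ (xs.length : Int)) :
    pvStepA xs t d 0 = d.insert ((xs.take t.toNat).headD "") ((xs.take t.toNat).drop 1) := by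
  obtain ⟨n, rfl⟩ := Int.eq_ofNat_of_zero_le (le_of_lt ht)
  unfold pvStepA
  rw [if_pos (by omega : (0 : Int) + n ≤ (xs.length : Int))]
  simp only [Int.toNat_natCast]
  congr 1
  · cases xs with
    | nil => simp at hts; omega
    | cons x l =>
      cases n with
      | zero => simp at ht
      | succ m => simp [PySem.List.pyGetD, List.take_succ_cons]
  · rw [show (0 : Int) + 1 = ((1 : Nat) : Int) by norm_num,
        show (0 : Int) + (n : Int) = ((n : Nat) : Int) by norm_num,
        PySem.List.slice_natCast, List.drop_take]

-- main loop invariant: A's fold over range(0, len(xs), t) equals B's group-consuming loop on xs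
lemma pvMain (t : Int) (ht : 0 < t) : ∀ (fuel : Nat) (xs : List String)
    (d : PySem.Dict String (List String)), xs.length ≤ fuel →
    (PySem.List.pyRange 0 (xs.length : Int) t).foldl (pvStepA xs t) d
      = pvAltGo (t.toNat - 1) xs d := by
  have hm : t.toNat - 1 + 1 = t.toNat := by omega
  intro fuel
  induction fuel with
  | zero =>
    intro xs d h
    have hxs : xs = [] := List.length_eq_zero_iff.mp (Nat.le_zero.mp h)
    subst hxs
    rw [pvAltGo, if_pos (by simp)]
    simp [PySem.List.pyRange_of_pos 0 0 ht]
  | succ k ih =>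
    intro xs d h
    by_cases hlt : (xs.length : Int) < t
    · -- no full group: A's guard never fires, B's first draw is already short
      rw [pvAltGo, if_pos (by simp only [List.length_take]; omega)]
      by_cases h0 : (0 : Int) < (xs.length : Int)
      · rw [pvPyRange_pos_cons 0 (xs.length : Int) t ht h0]
        rw [PySem.List.pyRange_of_pos (0 + t) (xs.length : Int) ht,
            if_neg (by omega : ¬ (0 + t < (xs.length : Int)))]
        simp only [List.range_zero, List.map_nil, List.foldl_cons, List.foldl_nil]
        unfold pvStepA
        rw [if_neg (by omega : ¬ ((0 : Int) + t ≤ (xs.length : Int)))]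
      · rw [PySem.List.pyRange_of_pos 0 (xs.length : Int) ht, if_neg (by omega)]
        simp
    · -- one full group, then recurse on the rest
      have h0 : (0 : Int) < (xs.length : Int) := by omega
      rw [pvPyRange_pos_cons 0 (xs.length : Int) t ht h0]
      simp only [List.foldl_cons, zero_add]
      rw [pvPyRange_shift t (xs.length : Int) t ht, List.foldl_map]
      rw [PySem.List.foldl_congr_mem _ _ (pvStepA (xs.drop t.toNat) t) _
            (fun acc i hi => pvStepA_shift t ht xs acc i
              (((PySem.List.mem_pyRange_iff_of_pos ht i).mp hi).1) (by omega))]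
      have hlen : ((xs.drop t.toNat).length : Int) = (xs.length : Int) - t := by
        simp [List.length_drop]; omega
      rw [← hlen, ih (xs.drop t.toNat) _ (by simp [List.length_drop]; omega)]
      conv_rhs => rw [pvAltGo]
      rw [hm, if_neg (by simp only [List.length_take]; omega)]
      rw [pvStepA_zero t ht xs d (by omega)]

-- for a negative tuple_size, range(0, len, t) is empty and B's guard short-circuits: both give {}
lemma pvNeg (xs : List String) (t : Int) (htneg : t < 0) :
    parse_csv_to_dict xs t = parse_csv_to_dict_alt xs t := by
  unfold parse_csv_to_dict parse_csv_to_dict_alt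
  rw [PySem.List.pyRange_of_neg 0 (xs.length : Int) htneg,
      if_neg (by omega : ¬ ((xs.length : Int) < 0)), if_pos (by omega : t ≤ 0)]
  simp

-- ===== VERDICT (by name: the statement is the Claim_ definition above) =====
theorem parse_csv_to_dict_spec : Claim_equal_parse_csv_to_dict := by
  intro xs t _ ht
  unfold Spec_parse_csv_to_dict
  rcases lt_or_gt_of_ne ht with hneg | hpos
  · exact pvNeg xs t hneg
  · unfold parse_csv_to_dict parse_csv_to_dict_alt
    rw [if_neg (by omega : ¬ t ≤ 0), pvMain t hpos xs.length xs PySem.Dict.empty le_rfl]
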